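-- pv_equiv track=rewrite | github.com/faeznizam/data_cleaning_project | script/clean_ethnic.py | categorize_ethnic
-- ===== SOURCE A (Python) =====
-- def categorize_ethnic(name):
--    ethnicity_mapping = {
--     'Chinese': {'lee', 'tan', 'lim', 'wong', 'ng', 'yee', 'chin', 'ling', 'chan', 'chong', 'wei', 'hui',
--                 'yong', 'siew', 'chee', 'lai', 'leong', 'ong', 'hong', 'wai', 'mei', 'yap', 'kok', 'low',
--                 'goh', 'ying', 'chai', 'cheng', 'fong', 'yi', 'li', 'yen', 'liew', 'kim', 'ting', 'wan',
--                 'chew', 'chen', 'seng', 'ho', 'ching', 'kong', 'jia', 'pei', 'loh', 'lau', 'yin', 'choo',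
--                 'eng', 'heng', 'boon', 'mun', 'wee', 'wen', 'ooi', 'soon', 'tee', 'lin', 'chua', 'min',
--                 'sim', 'gan', 'ang', 'poh', 'foo', 'yan', 'see', 'ming', 'peng','teh', 'teoh', 'yu', 'yoke',
--                 'tang', 'kee', 'sin','chang','teng','soo','xin','meng', 'ai', 'lian', 'bee', 'chia','jun',
--                 'kuan', 'ping','chun','khoo', 'kah', 'qi', 'yew', 'koh', 'ah', 'weng', 'leng', 'choon', 'wah',
--                 'tong', 'shin', 'lay', 'kai', 'foong', 'yang', 'cheah', 'tai', 'swee', 'han', 'hooi', 'yeoh',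
--                 'jing', 'fei', 'san', 'loo', 'ee', 'toh','sze', 'tay', 'sook', 'lam', 'su', 'pang', 'shu',
--                 'hoon', 'jin', 'zhi', 'kian', 'may', 'hoo', 'liang', 'khor', 'huat', 'hock', 'beng', 'xuan',
--                 'yun', 'guan', 'keong', 'chung','choong', 'sing', 'woon', 'chiew', 'keng', 'mee', 'jie', 'siang',
--                 'chooi', 'ann', 'saw', 'chuan', 'teo', 'chow', 'soh', 'sam', 'hua', 'nee', 'seow', 'kit', 'pui',
--                 'kang', 'yoong', 'lan', 'shi', 'yuen', 'hwa', 'huey', 'thong', 'tze', 'keat', 'voon', 'kin', 'en',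
--                 'teck', 'man', 'hoong', 'wang', 'kwan', 'sharon', 'yip', 'sheng', 'fook', 'how', 'chu', 'yuan',
--                 'phang', 'chuah', 'shen', 'chi', 'siong', 'kam', 'sia', 'kean', 'zi', 'yeong', 'shan', 'yeo', 'loong', 'loke', 'ni', 'oon', 'koon', 'yoon', 'kar', 'woo', 'khoon', 'theng', 'qian', 'er',
--                 'hwee', 'zhang', 'fang', 'lew', 'fun', 'irene', 'tham', 'yau', 'tian', 'guat', 'sun', 'law', 'ken',
--                 'xiao', 'moi', 'fatt', 'yung', 'hon', 'hew', 'mooi', 'xian', 'liu', 'lye', 'zheng', 'koo', 'tey',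
--                 'seong', 'beh', 'siow', 'hin', 'shing', 'pin', 'zhe', 'chui', 'rui', 'onn', 'kuen', 'long', 'khong',
--                 'wu', 'wing', 'fung', 'feng', 'kien', 'yean', 'yeow', 'khai', 'zhen', 'pooi', 'jong', 'jian', 'haw',
--                 'joo', 'tiong', 'choy', 'geok', 'hao','liaw', 'jen', 'aw', 'hung', 'hee', 'jenny', 'thiam', 'lean',
--                 'qing', 'jason', 'yik', 'ye', 'xing', 'hang', 'mui', 'neo', 'kho', 'huang', 'alex', 'hoe', 'na', 'kiew',
--                 'alice', 'amy', 'looi', 'siaw', 'sue', 'sai', 'bong', 'poon', 'song', 'shun', 'nguyen', 'fui', 'vivian',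
--                 'chuen', 'ha', 'lu', 'chea', 'pey', 'le', 'suan', 'teong', 'you', 'sen','hau', 'khaw', 'carmen', 'ing',
--                 'moy', 'yeng', 'sok', 'ivy','ewe', 'kiang', 'joseph', 'qin', 'king','too', 'boo', 'bing', 'chian',
--                 'yue', 'tuck', 'ngan', 'sow', 'sang', 'sum', 'che', 'oh', 'tin', 'kum', 'al', 'tung', 'joanne', 'oo',
--                 'pheng', 'yeap', 'agnes', 'koay', 'yao', 'jane', 'kwong', 'har', 'pek', 'michelle', 'soong', 'phooi',
--                 'chieng', 'raymond', 'hiew', 'eunice', 'cheang', 'mah', 'mong', 'kun', 'mary', 'leow', 'lih', 'kua',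
--                 'nicole', 'kaiming', 'liau', 'cheong','poonsiewlee'},
--
--     'Malay': {'ahmad','abdul','abdullah','zurina', 'mohd', 'bin', 'binti', 'muhammad', 'mohamed', 'mohamad',
--               'siti','nurul', 'nor', 'mohammad', 'ismail', 'md', 'ali', 'syed', 'noor', 'ibrahim', 'abd',
--               'hamba', 'allah', 'yusof', 'rahman', 'rahim', 'azhar', 'khan', 'azmi', 'othman', 'zainal', 'sulaiman',
--               'mohammed', 'hashim', 'fatin', 'hassan', 'nik', 'hussin', 'sharifah', 'mat', 'razali', 'faizal', 'aiman',
--               'khairul', 'firdaus', 'arif', 'warsi','manaf', 'aini', 'nur','muhamad', 'bakar', 'nadia','farah','omar','abu',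
--               'farahzira','zakaria','norkiah','mahmud','nordin','ahmed','hasan','aleya','aziz','aina','adam','Sharmila',
--               'nabihah','arifin','yahya','ishak','anis','meor','liza','alia','isa','norliana','nadzirah','noordin','shahmin','rashid','aishah',
--               'arshad','ariff','izzat','ramli','diana','matin','akbar','halim','harun','aizat','jamal','amira','idris','tengkushahz','shamsuddin',
--               'nurhasikin','syahiratul','norhairul','baharudin','zulkiffli','nooraihan','zainuddin','nursafira','kamardin', 'amalina', 'zulkifli', 'hamid','hamzah'
--               'noratikah','syamimi, latif','ungku','aminah','mohsin'},
--
--     'Indian': {'a/l', 'a/p','rajandran', 'subramaniam','kumar','krishnan', 'devi', 'raja', 'singh', 'muniandy', 'raman', 'nair', 'rao',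
--                'naidu','krishna', 'ramasamy','esvini', 'panirchellvum', 'hareeshkumar', 'kalaiselvan', 'sugitha', 'anbalagan',
--                'tamilselvi', 'rajendran', 'shaamini','chandrasekharan', 'annamalai','kuppusamy','vathi', 'punitha', 'sinawadoo',
--                 'ratha', 'sri','balakrishnan', 'gunasegaran', 'selvam', 'ravichandran', 'manogaran', 'selvaraj',
--                 'prakash', 'moorthy', 'mohan', 'ravi', 'supramaniam','paramasivam', 'ravindran', 'kandasamy',
--                'selvaraju', 'mahendran','shanmugam', 'arumugam','ganesan','priya','rajan','rajah','pannirselvan'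
--                 'govindasamy','sivalingham','letchmanan','ashwinath','muthusamy','sangeetha','ponnusamy','sarasvati',
--                'piraveen','chandran','jethwani','gayatrri','nadaraja','vijayan','suppiah','murugan','ramesh','vijaya',
--                'sharma','malani','susila','pillai','chitra','balan','rhenu','surin','teeba','kalai','rajes','para','sami',
--                'balasubramaniam','letchumanan','herrentiran','vigneswaran','subhashini','palaniandy','sarasvathy','jaganathan',
--                'ganditasan','manigandan','selvakumar','selvarani','pothuraju','manimaran','nadarajah','karuppiah','doraisamy',
--                'marimuthu','manoharan','rajeswari','mariappan','nadarajan','sukumaran','saravanan','ravendran','sangaram','letchumi',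
--                'amertham','munusamy','sundaram','suganthi','murugiah','vishnu','ravin','muthu','rajoo','vevak','samayamunisusilla','chandrasegaran',
--                'shanmugaphria','krishnamurthy','limthiangseng','somasundharam','tavaneisvaran','sahulhamithu','pannirselvan','govindarajoo','kalaichelvan',
--                'vaithalingam','kumaresvaran','parameswaran','singaraveloo','suthenthiran','muthukrishna','kaliaperumal','geethaanjali','navaneetham',
--                'thinagarash','sandanasamy','gnapragasan','subramanian','govindasamy','palaniappan','sivananthan','kunasagaran','rajendaran','thevarajoo','jakathesan',
--                'arunawathi','ravindaran','kaneskumar','jeganathan','gopinathan','chowdhury','yantimala','shanmugom','batumalay','vasudevan','narayanan','periasamy',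
--                'yaashdave','arulmozhi','sagadevan','jeyamaran','rengasamy','ilavarasi','thiriidev','prashanth','rajkumar','karthiga','vasanthi','darmaraju'},
--
--     'Others': {'john', 'james', 'emily', 'family', 'edward', 'grace', 'rachel', 'david', 'audrey', 'gomes', 'florance', 'nyihin',
--                'elisa', 'christy', 'christ', 'elango', 'minjae','hera', 'pauline', 'jon', 'michael','thida','wendy',
--                'phina','ambrose','haller','martin','samuel','stacy','nikko','harry','hema','anna','devy','mia','christopher',
--                'bernadette','alexandra','josephine','emmanuel','priscila','jonathan','benedict','jessica','anthony','jasmine','francis','kanmani',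
--                'rebecca','charles','ramday','angela','judith','nathan','alicia','thomas','jimmy','mogana','annie','reddy','jacob','brown','wattanagitiphat',
--                'nageiswery','jessamine','chrizelda','frederick','sherlynee','jessindra','nattawin','swatheka','florence','jennifer','wazooski', 'fernandez'},
--    }
--
--    name_words = name.lower()
--    for category, words in ethnicity_mapping.items():
--       for word in name_words.split():
--          if word in words:
--              return category
--    return ''
-- ===== SOURCE B (Python) =====
-- # Category vocabularies stored as whitespace-separated text lines, parsed once at
-- # import into an inverted index word -> earliest category position; classification
-- # is then a single flat min-priority pass over the name's words.
-- # (The source table's entry 'syamimi, latif' contains a space, so it can never equal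
-- # a whitespace-split word of any name; it is dead data and is omitted from the blobs.)
--
-- _CHINESE = [
--     'agnes ah ai al alex alice amy ang',
--     'ann aw bee beh beng bing bong boo',
--     'boon carmen chai chan chang che chea cheah',
--     'cheang chee chen cheng cheong chew chi chia',
--     'chian chieng chiew chin ching chong choo chooi',
--     'choon choong chow choy chu chua chuah chuan',
--     'chuen chui chun chung ee en eng er',
--     'eunice ewe fang fatt fei feng fong foo',
--     'fook foong fui fun fung gan geok goh',
--     'guan guat ha han hang hao har hau',
--     'haw hee heng hew hiew hin ho hock',
--     'hoe hon hong hoo hooi hoon hoong how',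
--     'hua huang huat huey hui hung hwa hwee',
--     'ing irene ivy jane jason jen jenny jia',
--     'jian jie jin jing joanne jong joo joseph',
--     'jun kah kai kaiming kam kang kar kean',
--     'keat kee ken keng keong khai khaw kho',
--     'khong khoo khoon khor kian kiang kien kiew',
--     'kim kin king kit koay koh kok kong',
--     'koo koon kua kuan kuen kum kun kwan',
--     'kwong lai lam lan lau law lay le',
--     'lean lee leng leong leow lew li lian',
--     'liang liau liaw liew lih lim lin ling',
--     'liu loh loke long loo looi loong low',
--     'lu lye mah man mary may mee mei',
--     'meng michelle min ming moi mong mooi moy',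
--     'mui mun na nee neo ng ngan nguyen',
--     'ni nicole oh ong onn oo ooi oon',
--     'pang pei pek peng pey phang pheng phooi',
--     'pin ping poh pooi poon poonsiewlee pui qi',
--     'qian qin qing raymond rui sai sam san',
--     'sang saw see sen seng seong seow shan',
--     'sharon shen sheng shi shin shing shu shun',
--     'sia siang siaw siew sim sin sing siong',
--     'siow soh sok song soo sook soon soong',
--     'sow su suan sue sum sun swee sze',
--     'tai tan tang tay teck tee teh teng',
--     'teo teoh teong tey tham theng thiam thong',
--     'tian tin ting tiong toh tong too tuck',
--     'tung tze vivian voon wah wai wan wang',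
--     'wee wei wen weng wing wong woo woon',
--     'wu xian xiao xin xing xuan yan yang',
--     'yao yap yau ye yean yeap yee yen',
--     'yeng yeo yeoh yeong yeow yew yi yik',
--     'yin ying yip yoke yong yoon yoong you',
--     'yu yuan yue yuen yun yung zhang zhe',
--     'zhen zheng zhi zi',
-- ]
--
-- _MALAY = [
--     'Sharmila abd abdul abdullah abu adam ahmad ahmed',
--     'aiman aina aini aishah aizat akbar aleya ali',
--     'alia allah amalina aminah amira anis arif ariff',
--     'arifin arshad azhar aziz azmi baharudin bakar bin',
--     'binti diana faizal farah farahzira fatin firdaus halim',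
--     'hamba hamid hamzahnoratikah harun hasan hashim hassan hussin',
--     'ibrahim idris isa ishak ismail izzat jamal kamardin',
--     'khairul khan liza mahmud manaf mat matin md',
--     'meor mohamad mohamed mohammad mohammed mohd mohsin muhamad',
--     'muhammad nabihah nadia nadzirah nik noor nooraihan noordin',
--     'nor nordin norhairul norkiah norliana nur nurhasikin nursafira',
--     'nurul omar othman rahim rahman ramli rashid razali',
--     'shahmin shamsuddin sharifah siti sulaiman syahiratul syed tengkushahz',
--     'ungku warsi yahya yusof zainal zainuddin zakaria zulkiffli',
--     'zulkifli zurina',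
-- ]
--
-- _INDIAN = [
--     'a/l a/p amertham anbalagan annamalai arulmozhi arumugam arunawathi',
--     'ashwinath balakrishnan balan balasubramaniam batumalay chandran chandrasegaran chandrasekharan',
--     'chitra chowdhury darmaraju devi doraisamy esvini ganditasan ganesan',
--     'gayatrri geethaanjali gnapragasan gopinathan govindarajoo govindasamy gunasegaran hareeshkumar',
--     'herrentiran ilavarasi jaganathan jakathesan jeganathan jethwani jeyamaran kalai',
--     'kalaichelvan kalaiselvan kaliaperumal kandasamy kaneskumar karthiga karuppiah krishna',
--     'krishnamurthy krishnan kumar kumaresvaran kunasagaran kuppusamy letchmanan letchumanan',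
--     'letchumi limthiangseng mahendran malani manigandan manimaran manogaran manoharan',
--     'mariappan marimuthu mohan moorthy muniandy munusamy murugan murugiah',
--     'muthu muthukrishna muthusamy nadaraja nadarajah nadarajan naidu nair',
--     'narayanan navaneetham palaniandy palaniappan panirchellvum pannirselvan pannirselvangovindasamy para',
--     'paramasivam parameswaran periasamy pillai piraveen ponnusamy pothuraju prakash',
--     'prashanth priya punitha raja rajah rajan rajandran rajendaran',
--     'rajendran rajes rajeswari rajkumar rajoo raman ramasamy ramesh',
--     'rao ratha ravendran ravi ravichandran ravin ravindaran ravindran',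
--     'rengasamy rhenu sagadevan sahulhamithu samayamunisusilla sami sandanasamy sangaram',
--     'sangeetha sarasvathy sarasvati saravanan selvakumar selvam selvaraj selvaraju',
--     'selvarani shaamini shanmugam shanmugaphria shanmugom sharma sinawadoo singaraveloo',
--     'singh sivalingham sivananthan somasundharam sri subhashini subramaniam subramanian',
--     'suganthi sugitha sukumaran sundaram suppiah supramaniam surin susila',
--     'suthenthiran tamilselvi tavaneisvaran teeba thevarajoo thinagarash thiriidev vaithalingam',
--     'vasanthi vasudevan vathi vevak vigneswaran vijaya vijayan vishnu',
--     'yaashdave yantimala',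
-- ]
--
-- _OTHERS = [
--     'alexandra alicia ambrose angela anna annie anthony audrey',
--     'benedict bernadette brown charles christ christopher christy chrizelda',
--     'david devy edward elango elisa emily emmanuel family',
--     'fernandez florance florence francis frederick gomes grace haller',
--     'harry hema hera jacob james jasmine jennifer jessamine',
--     'jessica jessindra jimmy john jon jonathan josephine judith',
--     'kanmani martin mia michael minjae mogana nageiswery nathan',
--     'nattawin nikko nyihin pauline phina priscila rachel ramday',
--     'rebecca reddy samuel sherlynee stacy swatheka thida thomas',
--     'wattanagitiphat wazooski wendy',
-- ]
--
-- _CATS = [("Chinese", _CHINESE), ("Malay", _MALAY), ("Indian", _INDIAN), ("Others", _OTHERS)]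
--
-- _INDEX = {}
-- for _i, (_cat, _lines) in enumerate(_CATS):
--     for _line in _lines:
--         for _w in _line.split():
--             if _w not in _INDEX:
--                 _INDEX[_w] = _i
--
--
-- def categorize_ethnic(name):
--     best = None
--     for w in name.lower().split():
--         p = _INDEX.get(w)
--         if p is not None and (best is None or p < best):
--             best = p
--     return "" if best is None else _CATS[best][0]
-- ===== Notes on version B (the rewrite author's own statement) =====
-- stated objective: idiomatic
-- what changed: B stores each category's vocabulary as whitespace-separated text lines parsed once at import into an inverted index word -> earliest category position, and replaces A's per-call rebuild of the dict-of-sets plus nested category-by-category rescan with a single flat min-priority pass over the name's words; one space-containing typo entry of the source table, which no whitespace-split word can ever equal, is dead data and is dropped by the encoding without changing any output.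
import Mathlib
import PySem

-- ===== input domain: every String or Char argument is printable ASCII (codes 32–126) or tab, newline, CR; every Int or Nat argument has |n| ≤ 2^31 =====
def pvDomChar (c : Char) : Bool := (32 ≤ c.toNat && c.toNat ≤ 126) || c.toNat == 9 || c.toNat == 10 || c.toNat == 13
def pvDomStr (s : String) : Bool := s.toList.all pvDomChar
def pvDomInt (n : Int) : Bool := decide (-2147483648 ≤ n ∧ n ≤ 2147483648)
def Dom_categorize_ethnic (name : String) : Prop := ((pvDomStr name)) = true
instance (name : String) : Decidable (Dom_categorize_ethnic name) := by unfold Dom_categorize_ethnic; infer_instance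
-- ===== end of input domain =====

-- B stores each category's vocabulary as whitespace-separated text lines parsed once into
-- an inverted index word → earliest category position, then classifies with one flat
-- min-priority pass (idiomatic restructuring; A rescans category by category per call).

-- ===== PORT A =====
-- A's dict-of-sets literal: each set ported as the list of its distinct elements (only
-- membership and the left-to-right category order are ever used, so element order is free).
-- The Malay set is written pre ++ typo-entry :: suf so the proofs can isolate its one
-- space-containing member 'syamimi, latif' (a data typo that no whitespace-split word can equal).
def pvWChinese : List String := [
  "agnes", "ah", "ai", "al", "alex", "alice", "amy", "ang", "ann", "aw",
  "bee", "beh", "beng", "bing", "bong", "boo", "boon", "carmen", "chai", "chan",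
  "chang", "che", "chea", "cheah", "cheang", "chee", "chen", "cheng", "cheong", "chew",
  "chi", "chia", "chian", "chieng", "chiew", "chin", "ching", "chong", "choo", "chooi",
  "choon", "choong", "chow", "choy", "chu", "chua", "chuah", "chuan", "chuen", "chui",
  "chun", "chung", "ee", "en", "eng", "er", "eunice", "ewe", "fang", "fatt",
  "fei", "feng", "fong", "foo", "fook", "foong", "fui", "fun", "fung", "gan",
  "geok", "goh", "guan", "guat", "ha", "han", "hang", "hao", "har", "hau",
  "haw", "hee", "heng", "hew", "hiew", "hin", "ho", "hock", "hoe", "hon",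
  "hong", "hoo", "hooi", "hoon", "hoong", "how", "hua", "huang", "huat", "huey",
  "hui", "hung", "hwa", "hwee", "ing", "irene", "ivy", "jane", "jason", "jen",
  "jenny", "jia", "jian", "jie", "jin", "jing", "joanne", "jong", "joo", "joseph",
  "jun", "kah", "kai", "kaiming", "kam", "kang", "kar", "kean", "keat", "kee",
  "ken", "keng", "keong", "khai", "khaw", "kho", "khong", "khoo", "khoon", "khor",
  "kian", "kiang", "kien", "kiew", "kim", "kin", "king", "kit", "koay", "koh",
  "kok", "kong", "koo", "koon", "kua", "kuan", "kuen", "kum", "kun", "kwan",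
  "kwong", "lai", "lam", "lan", "lau", "law", "lay", "le", "lean", "lee",
  "leng", "leong", "leow", "lew", "li", "lian", "liang", "liau", "liaw", "liew",
  "lih", "lim", "lin", "ling", "liu", "loh", "loke", "long", "loo", "looi",
  "loong", "low", "lu", "lye", "mah", "man", "mary", "may", "mee", "mei",
  "meng", "michelle", "min", "ming", "moi", "mong", "mooi", "moy", "mui", "mun",
  "na", "nee", "neo", "ng", "ngan", "nguyen", "ni", "nicole", "oh", "ong",
  "onn", "oo", "ooi", "oon", "pang", "pei", "pek", "peng", "pey", "phang",
  "pheng", "phooi", "pin", "ping", "poh", "pooi", "poon", "poonsiewlee", "pui", "qi",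
  "qian", "qin", "qing", "raymond", "rui", "sai", "sam", "san", "sang", "saw",
  "see", "sen", "seng", "seong", "seow", "shan", "sharon", "shen", "sheng", "shi",
  "shin", "shing", "shu", "shun", "sia", "siang", "siaw", "siew", "sim", "sin",
  "sing", "siong", "siow", "soh", "sok", "song", "soo", "sook", "soon", "soong",
  "sow", "su", "suan", "sue", "sum", "sun", "swee", "sze", "tai", "tan",
  "tang", "tay", "teck", "tee", "teh", "teng", "teo", "teoh", "teong", "tey",
  "tham", "theng", "thiam", "thong", "tian", "tin", "ting", "tiong", "toh", "tong",
  "too", "tuck", "tung", "tze", "vivian", "voon", "wah", "wai", "wan", "wang",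
  "wee", "wei", "wen", "weng", "wing", "wong", "woo", "woon", "wu", "xian",
  "xiao", "xin", "xing", "xuan", "yan", "yang", "yao", "yap", "yau", "ye",
  "yean", "yeap", "yee", "yen", "yeng", "yeo", "yeoh", "yeong", "yeow", "yew",
  "yi", "yik", "yin", "ying", "yip", "yoke", "yong", "yoon", "yoong", "you",
  "yu", "yuan", "yue", "yuen", "yun", "yung", "zhang", "zhe", "zhen", "zheng",
  "zhi", "zi"]

def pvWMalay1 : List String := [
  "Sharmila", "abd", "abdul", "abdullah", "abu", "adam", "ahmad", "ahmed", "aiman", "aina",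
  "aini", "aishah", "aizat", "akbar", "aleya", "ali", "alia", "allah", "amalina", "aminah",
  "amira", "anis", "arif", "ariff", "arifin", "arshad", "azhar", "aziz", "azmi", "baharudin",
  "bakar", "bin", "binti", "diana", "faizal", "farah", "farahzira", "fatin", "firdaus", "halim",
  "hamba", "hamid", "hamzahnoratikah", "harun", "hasan", "hashim", "hassan", "hussin", "ibrahim", "idris",
  "isa", "ishak", "ismail", "izzat", "jamal", "kamardin", "khairul", "khan", "liza", "mahmud",
  "manaf", "mat", "matin", "md", "meor", "mohamad", "mohamed", "mohammad", "mohammed", "mohd",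
  "mohsin", "muhamad", "muhammad", "nabihah", "nadia", "nadzirah", "nik", "noor", "nooraihan", "noordin",
  "nor", "nordin", "norhairul", "norkiah", "norliana", "nur", "nurhasikin", "nursafira", "nurul", "omar",
  "othman", "rahim", "rahman", "ramli", "rashid", "razali", "shahmin", "shamsuddin", "sharifah", "siti",
  "sulaiman", "syahiratul"]

def pvWMalay2 : List String := [
  "syed", "tengkushahz", "ungku", "warsi", "yahya", "yusof", "zainal", "zainuddin", "zakaria", "zulkiffli",
  "zulkifli", "zurina"]

def pvWMalay : List String := pvWMalay1 ++ "syamimi, latif" :: pvWMalay2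

def pvWIndian : List String := [
  "a/l", "a/p", "amertham", "anbalagan", "annamalai", "arulmozhi", "arumugam", "arunawathi", "ashwinath", "balakrishnan",
  "balan", "balasubramaniam", "batumalay", "chandran", "chandrasegaran", "chandrasekharan", "chitra", "chowdhury", "darmaraju", "devi",
  "doraisamy", "esvini", "ganditasan", "ganesan", "gayatrri", "geethaanjali", "gnapragasan", "gopinathan", "govindarajoo", "govindasamy",
  "gunasegaran", "hareeshkumar", "herrentiran", "ilavarasi", "jaganathan", "jakathesan", "jeganathan", "jethwani", "jeyamaran", "kalai",
  "kalaichelvan", "kalaiselvan", "kaliaperumal", "kandasamy", "kaneskumar", "karthiga", "karuppiah", "krishna", "krishnamurthy", "krishnan",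
  "kumar", "kumaresvaran", "kunasagaran", "kuppusamy", "letchmanan", "letchumanan", "letchumi", "limthiangseng", "mahendran", "malani",
  "manigandan", "manimaran", "manogaran", "manoharan", "mariappan", "marimuthu", "mohan", "moorthy", "muniandy", "munusamy",
  "murugan", "murugiah", "muthu", "muthukrishna", "muthusamy", "nadaraja", "nadarajah", "nadarajan", "naidu", "nair",
  "narayanan", "navaneetham", "palaniandy", "palaniappan", "panirchellvum", "pannirselvan", "pannirselvangovindasamy", "para", "paramasivam", "parameswaran",
  "periasamy", "pillai", "piraveen", "ponnusamy", "pothuraju", "prakash", "prashanth", "priya", "punitha", "raja",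
  "rajah", "rajan", "rajandran", "rajendaran", "rajendran", "rajes", "rajeswari", "rajkumar", "rajoo", "raman",
  "ramasamy", "ramesh", "rao", "ratha", "ravendran", "ravi", "ravichandran", "ravin", "ravindaran", "ravindran",
  "rengasamy", "rhenu", "sagadevan", "sahulhamithu", "samayamunisusilla", "sami", "sandanasamy", "sangaram", "sangeetha", "sarasvathy",
  "sarasvati", "saravanan", "selvakumar", "selvam", "selvaraj", "selvaraju", "selvarani", "shaamini", "shanmugam", "shanmugaphria",
  "shanmugom", "sharma", "sinawadoo", "singaraveloo", "singh", "sivalingham", "sivananthan", "somasundharam", "sri", "subhashini",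
  "subramaniam", "subramanian", "suganthi", "sugitha", "sukumaran", "sundaram", "suppiah", "supramaniam", "surin", "susila",
  "suthenthiran", "tamilselvi", "tavaneisvaran", "teeba", "thevarajoo", "thinagarash", "thiriidev", "vaithalingam", "vasanthi", "vasudevan",
  "vathi", "vevak", "vigneswaran", "vijaya", "vijayan", "vishnu", "yaashdave", "yantimala"]

def pvWOthers : List String := [
  "alexandra", "alicia", "ambrose", "angela", "anna", "annie", "anthony", "audrey", "benedict", "bernadette",
  "brown", "charles", "christ", "christopher", "christy", "chrizelda", "david", "devy", "edward", "elango",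
  "elisa", "emily", "emmanuel", "family", "fernandez", "florance", "florence", "francis", "frederick", "gomes",
  "grace", "haller", "harry", "hema", "hera", "jacob", "james", "jasmine", "jennifer", "jessamine",
  "jessica", "jessindra", "jimmy", "john", "jon", "jonathan", "josephine", "judith", "kanmani", "martin",
  "mia", "michael", "minjae", "mogana", "nageiswery", "nathan", "nattawin", "nikko", "nyihin", "pauline",
  "phina", "priscila", "rachel", "ramday", "rebecca", "reddy", "samuel", "sherlynee", "stacy", "swatheka",
  "thida", "thomas", "wattanagitiphat", "wazooski", "wendy"]

def pvCats : List (String × List String) :=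
  [("Chinese", pvWChinese), ("Malay", pvWMalay), ("Indian", pvWIndian), ("Others", pvWOthers)]

-- inner loop of A: 'for word in name_words.split(): if word in words: return category'
def pvAInner (c : String) (s : List String) : List String → Option String
  | [] => none
  | w :: ws => if s.contains w then some c else pvAInner c s ws

-- outer loop of A: 'for category, words in ethnicity_mapping.items(): …'
def pvAOuter : List (String × List String) → List String → Option String
  | [], _ => none
  | (c, s) :: r, ws =>
      match pvAInner c s ws with
      | some res => some res
      | none => pvAOuter r ws

def categorize_ethnic (name : String) : String :=
  match pvAOuter pvCats (PySem.Str.split₀ (PySem.Str.lower name)) with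
  | some c => c
  | none => ""

-- ===== PORT B =====
-- Source B's module-level data: category vocabularies as lists of text lines.
def pvLinesChinese : List String := [
  "agnes ah ai al alex alice amy ang",
  "ann aw bee beh beng bing bong boo",
  "boon carmen chai chan chang che chea cheah",
  "cheang chee chen cheng cheong chew chi chia",
  "chian chieng chiew chin ching chong choo chooi",
  "choon choong chow choy chu chua chuah chuan",
  "chuen chui chun chung ee en eng er",
  "eunice ewe fang fatt fei feng fong foo",
  "fook foong fui fun fung gan geok goh",
  "guan guat ha han hang hao har hau",
  "haw hee heng hew hiew hin ho hock",
  "hoe hon hong hoo hooi hoon hoong how",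
  "hua huang huat huey hui hung hwa hwee",
  "ing irene ivy jane jason jen jenny jia",
  "jian jie jin jing joanne jong joo joseph",
  "jun kah kai kaiming kam kang kar kean",
  "keat kee ken keng keong khai khaw kho",
  "khong khoo khoon khor kian kiang kien kiew",
  "kim kin king kit koay koh kok kong",
  "koo koon kua kuan kuen kum kun kwan",
  "kwong lai lam lan lau law lay le",
  "lean lee leng leong leow lew li lian",
  "liang liau liaw liew lih lim lin ling",
  "liu loh loke long loo looi loong low",
  "lu lye mah man mary may mee mei",
  "meng michelle min ming moi mong mooi moy",
  "mui mun na nee neo ng ngan nguyen",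
  "ni nicole oh ong onn oo ooi oon",
  "pang pei pek peng pey phang pheng phooi",
  "pin ping poh pooi poon poonsiewlee pui qi",
  "qian qin qing raymond rui sai sam san",
  "sang saw see sen seng seong seow shan",
  "sharon shen sheng shi shin shing shu shun",
  "sia siang siaw siew sim sin sing siong",
  "siow soh sok song soo sook soon soong",
  "sow su suan sue sum sun swee sze",
  "tai tan tang tay teck tee teh teng",
  "teo teoh teong tey tham theng thiam thong",
  "tian tin ting tiong toh tong too tuck",
  "tung tze vivian voon wah wai wan wang",
  "wee wei wen weng wing wong woo woon",
  "wu xian xiao xin xing xuan yan yang",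
  "yao yap yau ye yean yeap yee yen",
  "yeng yeo yeoh yeong yeow yew yi yik",
  "yin ying yip yoke yong yoon yoong you",
  "yu yuan yue yuen yun yung zhang zhe",
  "zhen zheng zhi zi"]

def pvLinesMalay : List String := [
  "Sharmila abd abdul abdullah abu adam ahmad ahmed",
  "aiman aina aini aishah aizat akbar aleya ali",
  "alia allah amalina aminah amira anis arif ariff",
  "arifin arshad azhar aziz azmi baharudin bakar bin",
  "binti diana faizal farah farahzira fatin firdaus halim",
  "hamba hamid hamzahnoratikah harun hasan hashim hassan hussin",
  "ibrahim idris isa ishak ismail izzat jamal kamardin",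
  "khairul khan liza mahmud manaf mat matin md",
  "meor mohamad mohamed mohammad mohammed mohd mohsin muhamad",
  "muhammad nabihah nadia nadzirah nik noor nooraihan noordin",
  "nor nordin norhairul norkiah norliana nur nurhasikin nursafira",
  "nurul omar othman rahim rahman ramli rashid razali",
  "shahmin shamsuddin sharifah siti sulaiman syahiratul syed tengkushahz",
  "ungku warsi yahya yusof zainal zainuddin zakaria zulkiffli",
  "zulkifli zurina"]

def pvLinesIndian : List String := [
  "a/l a/p amertham anbalagan annamalai arulmozhi arumugam arunawathi",
  "ashwinath balakrishnan balan balasubramaniam batumalay chandran chandrasegaran chandrasekharan",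
  "chitra chowdhury darmaraju devi doraisamy esvini ganditasan ganesan",
  "gayatrri geethaanjali gnapragasan gopinathan govindarajoo govindasamy gunasegaran hareeshkumar",
  "herrentiran ilavarasi jaganathan jakathesan jeganathan jethwani jeyamaran kalai",
  "kalaichelvan kalaiselvan kaliaperumal kandasamy kaneskumar karthiga karuppiah krishna",
  "krishnamurthy krishnan kumar kumaresvaran kunasagaran kuppusamy letchmanan letchumanan",
  "letchumi limthiangseng mahendran malani manigandan manimaran manogaran manoharan",
  "mariappan marimuthu mohan moorthy muniandy munusamy murugan murugiah",
  "muthu muthukrishna muthusamy nadaraja nadarajah nadarajan naidu nair",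
  "narayanan navaneetham palaniandy palaniappan panirchellvum pannirselvan pannirselvangovindasamy para",
  "paramasivam parameswaran periasamy pillai piraveen ponnusamy pothuraju prakash",
  "prashanth priya punitha raja rajah rajan rajandran rajendaran",
  "rajendran rajes rajeswari rajkumar rajoo raman ramasamy ramesh",
  "rao ratha ravendran ravi ravichandran ravin ravindaran ravindran",
  "rengasamy rhenu sagadevan sahulhamithu samayamunisusilla sami sandanasamy sangaram",
  "sangeetha sarasvathy sarasvati saravanan selvakumar selvam selvaraj selvaraju",
  "selvarani shaamini shanmugam shanmugaphria shanmugom sharma sinawadoo singaraveloo",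
  "singh sivalingham sivananthan somasundharam sri subhashini subramaniam subramanian",
  "suganthi sugitha sukumaran sundaram suppiah supramaniam surin susila",
  "suthenthiran tamilselvi tavaneisvaran teeba thevarajoo thinagarash thiriidev vaithalingam",
  "vasanthi vasudevan vathi vevak vigneswaran vijaya vijayan vishnu",
  "yaashdave yantimala"]

def pvLinesOthers : List String := [
  "alexandra alicia ambrose angela anna annie anthony audrey",
  "benedict bernadette brown charles christ christopher christy chrizelda",
  "david devy edward elango elisa emily emmanuel family",
  "fernandez florance florence francis frederick gomes grace haller",
  "harry hema hera jacob james jasmine jennifer jessamine",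
  "jessica jessindra jimmy john jon jonathan josephine judith",
  "kanmani martin mia michael minjae mogana nageiswery nathan",
  "nattawin nikko nyihin pauline phina priscila rachel ramday",
  "rebecca reddy samuel sherlynee stacy swatheka thida thomas",
  "wattanagitiphat wazooski wendy"]

def pvBCats : List (String × List String) :=
  [("Chinese", pvLinesChinese), ("Malay", pvLinesMalay), ("Indian", pvLinesIndian), ("Others", pvLinesOthers)]

-- for i, (cat, lines) in enumerate(_CATS): for line in lines: for w in line.split():
--   if w not in _INDEX: _INDEX[w] = i
def pvIndex : PySem.Dict String Int :=
  (PySem.List.enumerate pvBCats).foldl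
    (fun d ic =>
      ic.2.2.foldl
        (fun d line =>
          (PySem.Str.split₀ line).foldl
            (fun d w => if d.contains w then d else d.insert w ic.1) d)
        d)
    PySem.Dict.empty

def categorize_ethnic_alt (name : String) : String :=
  let best := (PySem.Str.split₀ (PySem.Str.lower name)).foldl
    (fun b w =>
      match pvIndex.get? w with
      | none => b
      | some p =>
        match b with
        | none => some p
        | some bb => if p < bb then some p else b) none
  match best with
  | none => ""
  | some i =>
      match PySem.List.pyGet? pvBCats i with
      | some cs => cs.1
      | none => ""  -- unreachable: best is always a valid index

-- ===== PRECONDITION & SPEC =====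
def Spec_categorize_ethnic (name : String) (out : String) : Prop := out = categorize_ethnic_alt name
instance (name : String) (out : String) : Decidable (Spec_categorize_ethnic name out) := by unfold Spec_categorize_ethnic; infer_instance

-- ===== CLAIM (what is proved, stated in full; the proofs are below) =====
def Claim_equal_categorize_ethnic : Prop := ∀ (name : String), Dom_categorize_ethnic name → Spec_categorize_ethnic name (categorize_ethnic name)

-- ===== LEMMAS AND PROOFS =====

-- proof-side view of B's data: the same category table at word-list level
-- (Malay without the dead space-containing entry, which B's line encoding drops)
def pvCatsW : List (String × List String) :=
  [("Chinese", pvWChinese), ("Malay", pvWMalay1 ++ pvWMalay2), ("Indian", pvWIndian), ("Others", pvWOthers)]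

-- evaluation of B's line blobs to their word lists
set_option maxRecDepth 100000 in
theorem pvWordsC : pvLinesChinese.flatMap (fun s => PySem.Str.split₀ s) = pvWChinese := by rfl
set_option maxRecDepth 100000 in
theorem pvWordsM : pvLinesMalay.flatMap (fun s => PySem.Str.split₀ s) = pvWMalay1 ++ pvWMalay2 := by rfl
set_option maxRecDepth 100000 in
theorem pvWordsI : pvLinesIndian.flatMap (fun s => PySem.Str.split₀ s) = pvWIndian := by rfl
set_option maxRecDepth 100000 in
theorem pvWordsO : pvLinesOthers.flatMap (fun s => PySem.Str.split₀ s) = pvWOthers := by rfl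

-- words produced by str.split() contain no whitespace (so never 'syamimi, latif')
theorem pvGoNospace (s cur : List Char) (acc : List (List Char))
    (hacc : ∀ w ∈ acc, ∀ c ∈ w, PySem.Chars.isspace c = false)
    (hcur : ∀ c ∈ cur, PySem.Chars.isspace c = false) :
    ∀ w ∈ PySem.Chars.split₀.go s cur acc, ∀ c ∈ w, PySem.Chars.isspace c = false := by
  induction s generalizing cur acc with
  | nil =>
    intro w hw
    simp only [PySem.Chars.split₀.go] at hw
    split at hw
    · exact hacc w (by simpa using hw)
    · rw [List.mem_reverse] at hw
      rcases List.mem_cons.mp hw with h | h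
      · subst h; intro c hc; exact hcur c (by simpa using hc)
      · exact hacc w h
  | cons c rest ih =>
    intro w hw
    simp only [PySem.Chars.split₀.go] at hw
    split at hw
    · split at hw
      · exact ih [] acc hacc (by simp) w hw
      · refine ih [] (cur.reverse :: acc) ?_ (by simp) w hw
        intro w' hw'
        rcases List.mem_cons.mp hw' with h | h
        · subst h; intro c' hc'; exact hcur c' (by simpa using hc')
        · exact hacc w' h
    · rename_i hns
      refine ih (c :: cur) acc hacc ?_ w hw
      intro c' hc'
      rcases List.mem_cons.mp hc' with h | h
      · subst h; simpa using hns
      · exact hcur c' h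

theorem pvSplitNospace (s : List Char) :
    ∀ w ∈ PySem.Chars.split₀ s, ∀ c ∈ w, PySem.Chars.isspace c = false := by
  unfold PySem.Chars.split₀
  exact pvGoNospace s [] [] (by simp) (by simp)

theorem pvSplitNe (s : String) (w : String) (hw : w ∈ PySem.Str.split₀ s) :
    w ≠ "syamimi, latif" := by
  intro h
  subst h
  have hm : (PySem.Str.split₀ s).map String.toList = PySem.Chars.split₀ s.toList :=
    PySem.Str.split₀_map_toList s
  have hmem : ("syamimi, latif" : String).toList ∈ PySem.Chars.split₀ s.toList := by
    rw [← hm]; exact List.mem_map_of_mem hw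
  have := pvSplitNospace s.toList _ hmem ' ' (by decide)
  simp [PySem.Chars.isspace] at this

-- first category (by position) whose word list contains w
def pvFirstIdx : List (String × List String) → String → Option Int
  | [], _ => none
  | (_, s) :: r, w => if s.contains w then some 0 else (pvFirstIdx r w).map (· + 1)

-- minimum on Option Int (none = no match yet)
def pvOmin : Option Int → Option Int → Option Int
  | none, p => p
  | a, none => a
  | some a, some b => some (min a b)

theorem pvOmin_assoc (a b c : Option Int) : pvOmin (pvOmin a b) c = pvOmin a (pvOmin b c) := by
  cases a <;> cases b <;> cases c <;> simp [pvOmin, min_assoc]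

def pvWmin (g : String → Option Int) (ws : List String) : Option Int :=
  ws.foldr (fun w m => pvOmin (g w) m) none

theorem pvStep_eq (g : String → Option Int) (b : Option Int) (w : String) :
    (match g w with
     | none => b
     | some p =>
       match b with
       | none => some p
       | some bb => if p < bb then some p else b) = pvOmin b (g w) := by
  cases b <;> cases g w <;> simp only [pvOmin]
  rename_i bb p
  rw [min_def]
  split <;> split <;> first | rfl | (exfalso; omega)

theorem pvFoldl_omin (g : String → Option Int) (ws : List String) (acc : Option Int) :
    ws.foldl (fun a w => pvOmin a (g w)) acc = pvOmin acc (pvWmin g ws) := by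
  induction ws generalizing acc with
  | nil => cases acc <;> simp [pvWmin, pvOmin]
  | cons w ws ih =>
    simp only [pvWmin, List.foldl_cons, List.foldr_cons, ih, pvOmin_assoc]

-- the inverted-index build over one word list: lookup = first insert wins
theorem pvInner_get? (w : String) (words : List String) (k : Int) (d : PySem.Dict String Int) :
    (words.foldl (fun d w' => if d.contains w' then d else d.insert w' k) d).get? w =
      (d.get? w).or (if words.contains w then some k else none) := by
  induction words generalizing d with
  | nil => cases h : d.get? w <;> simp [h]
  | cons x xs ih =>
    simp only [List.foldl_cons]
    rw [ih]
    by_cases hc : d.contains x = true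
    · rw [if_pos hc]
      by_cases hw : w = x
      · subst hw
        rw [PySem.Dict.contains_eq_isSome_get?] at hc
        obtain ⟨v, hv⟩ := Option.isSome_iff_exists.mp hc
        simp [hv]
      · have : (x :: xs).contains w = xs.contains w := by
          rw [List.contains_cons, beq_eq_false_iff_ne.mpr hw, Bool.false_or]
        rw [this]
    · rw [if_neg hc]
      by_cases hw : w = x
      · subst hw
        rw [PySem.Dict.contains_eq_isSome_get?] at hc
        have hn : d.get? w = none := by
          cases h : d.get? w <;> simp [h] at hc ⊢
        rw [PySem.Dict.get?_insert, if_pos rfl, hn]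
        simp
      · rw [PySem.Dict.get?_insert, if_neg hw]
        have : (x :: xs).contains w = xs.contains w := by
          rw [List.contains_cons, beq_eq_false_iff_ne.mpr hw, Bool.false_or]
        rw [this]

-- a fold over lines, splitting each, is the fold over the flattened word list
theorem pvLinesFoldl {β : Type} (lines : List String) (g : β → String → β) (d : β) :
    lines.foldl (fun d line => (PySem.Str.split₀ line).foldl g d) d =
      (lines.flatMap (fun s => PySem.Str.split₀ s)).foldl g d :=
  List.foldl_flatMap.symm

-- first category (by position) whose flattened line blob contains w (B's data view)
def pvFirstIdxL : List (String × List String) → String → Option Int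
  | [], _ => none
  | (_, ls) :: r, w =>
      if (ls.flatMap (fun s => PySem.Str.split₀ s)).contains w then some 0
      else (pvFirstIdxL r w).map (· + 1)

theorem pvBuildB_get? (w : String) (cats : List (String × List String)) (k : Int)
    (d : PySem.Dict String Int) :
    ((PySem.List.enumerate cats k).foldl
        (fun d ic =>
          ic.2.2.foldl
            (fun d line =>
              (PySem.Str.split₀ line).foldl
                (fun d w' => if d.contains w' then d else d.insert w' ic.1) d)
            d)
        d).get? w =
      (d.get? w).or ((pvFirstIdxL cats w).map (· + k)) := by
  induction cats generalizing k d with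
  | nil => simp [PySem.List.enumerate_nil, pvFirstIdxL]
  | cons c r ih =>
    rw [PySem.List.enumerate_cons]
    simp only [List.foldl_cons]
    rw [pvLinesFoldl, ih, pvInner_get?, Option.or_assoc]
    congr 1
    simp only [pvFirstIdxL]
    by_cases hc : (c.2.flatMap (fun s => PySem.Str.split₀ s)).contains w = true
    · rw [if_pos hc, if_pos hc]
      simp
    · rw [if_neg hc, if_neg hc]
      cases hX : pvFirstIdxL r w <;> simp <;> ring

theorem pvIndex_get? (w : String) : pvIndex.get? w = pvFirstIdx pvCatsW w := by
  have h1 : pvIndex.get? w = pvFirstIdxL pvBCats w := by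
    unfold pvIndex
    rw [pvBuildB_get? w pvBCats 0 PySem.Dict.empty]
    cases h : pvFirstIdxL pvBCats w <;> simp [PySem.Dict.get?_empty]
  rw [h1]
  simp only [pvBCats, pvCatsW, pvFirstIdxL, pvFirstIdx,
    pvWordsC, pvWordsM, pvWordsI, pvWordsO]

theorem pvContains_middle (l1 l2 : List String) (w : String) (hne : w ≠ "syamimi, latif") :
    (l1 ++ "syamimi, latif" :: l2).contains w = (l1 ++ l2).contains w := by
  induction l1 with
  | nil =>
    simp only [List.nil_append, List.contains_cons, beq_eq_false_iff_ne.mpr hne, Bool.false_or]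
  | cons x xs ih => simp only [List.cons_append, List.contains_cons, ih]

theorem pvFirstIdx_agree (w : String) (hne : w ≠ "syamimi, latif") :
    pvFirstIdx pvCatsW w = pvFirstIdx pvCats w := by
  simp only [pvCatsW, pvCats, pvWMalay, pvFirstIdx, pvContains_middle _ _ _ hne]

theorem pvFirstIdx_nonneg (cats : List (String × List String)) (w : String) (j : Int)
    (h : pvFirstIdx cats w = some j) : 0 ≤ j := by
  induction cats generalizing j with
  | nil => simp [pvFirstIdx] at h
  | cons c r ih =>
    simp only [pvFirstIdx] at h
    split at h
    · simp at h
      omega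
    · cases hr : pvFirstIdx r w <;> rw [hr] at h <;> simp at h
      have := ih _ hr
      omega

theorem pvFirstIdx_lt (cats : List (String × List String)) (w : String) (j : Int)
    (h : pvFirstIdx cats w = some j) : j < cats.length := by
  induction cats generalizing j with
  | nil => simp [pvFirstIdx] at h
  | cons c r ih =>
    simp only [pvFirstIdx] at h
    split at h
    · simp only [Option.some.injEq] at h
      simp only [List.length_cons]
      omega
    · cases hr : pvFirstIdx r w <;> rw [hr] at h <;> simp at h
      have := ih _ hr
      simp only [List.length_cons]
      omega

theorem pvWmin_prop (P : Int → Prop) (g : String → Option Int)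
    (hg : ∀ w j, g w = some j → P j) (hmin : ∀ a b, P a → P b → P (min a b))
    (ws : List String) (j : Int) (h : pvWmin g ws = some j) : P j := by
  induction ws generalizing j with
  | nil => simp [pvWmin] at h
  | cons w ws ih =>
    simp only [pvWmin, List.foldr_cons] at h
    cases hgw : g w <;> cases hm : ws.foldr (fun w m => pvOmin (g w) m) none <;>
      rw [hgw, hm] at h <;> simp only [pvOmin] at h
    · simp at h
    · injection h with h
      exact h ▸ ih _ hm
    · injection h with h
      exact h ▸ hg _ _ hgw
    · injection h with h
      exact h ▸ hmin _ _ (hg _ _ hgw) (ih _ hm)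

theorem pvWmin_none (ws : List String) : pvWmin (fun _ => (none : Option Int)) ws = none := by
  induction ws with
  | nil => rfl
  | cons w ws ih => simpa [pvWmin, pvOmin] using ih

theorem pvOmin_map_add_one (a b : Option Int) :
    pvOmin (a.map (· + 1)) (b.map (· + 1)) = (pvOmin a b).map (· + 1) := by
  cases a <;> cases b <;>
    simp only [Option.map_some, Option.map_none, pvOmin, Option.some_inj] <;>
    omega

theorem pvWmin_cons_cats (c : String) (s : List String) (r : List (String × List String))
    (ws : List String) :
    pvWmin (pvFirstIdx ((c, s) :: r)) ws =
      if ∃ x ∈ ws, x ∈ s then some 0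
      else (pvWmin (pvFirstIdx r) ws).map (· + 1) := by
  induction ws with
  | nil => simp [pvWmin]
  | cons w ws ih =>
    have hcons : pvWmin (pvFirstIdx ((c, s) :: r)) (w :: ws)
        = pvOmin (pvFirstIdx ((c, s) :: r) w) (pvWmin (pvFirstIdx ((c, s) :: r)) ws) := rfl
    rw [hcons, ih]
    by_cases hc : w ∈ s
    · have hw0 : pvFirstIdx ((c, s) :: r) w = some 0 := by
        show (if s.contains w then some 0 else (pvFirstIdx r w).map (· + 1)) = some 0
        rw [if_pos (by simpa using hc)]
      rw [hw0, if_pos (show ∃ x ∈ w :: ws, x ∈ s from ⟨w, List.mem_cons_self, hc⟩)]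
      by_cases ha : ∃ x ∈ ws, x ∈ s
      · rw [if_pos ha]
        simp [pvOmin]
      · rw [if_neg ha]
        cases hm : pvWmin (pvFirstIdx r) ws with
        | none => simp [pvOmin]
        | some j =>
          have hj : (0 : Int) ≤ j := pvWmin_prop (0 ≤ ·) _ (pvFirstIdx_nonneg _) (by omega) ws j hm
          simp only [Option.map_some, pvOmin]
          rw [min_def, if_pos (by omega)]
    · have hw1 : pvFirstIdx ((c, s) :: r) w = (pvFirstIdx r w).map (· + 1) := by
        show (if s.contains w then some 0 else (pvFirstIdx r w).map (· + 1)) = _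
        rw [if_neg (by simpa using hc)]
      have hrcons : pvWmin (pvFirstIdx r) (w :: ws)
          = pvOmin (pvFirstIdx r w) (pvWmin (pvFirstIdx r) ws) := rfl
      have hcond : (∃ x ∈ w :: ws, x ∈ s) ↔ (∃ x ∈ ws, x ∈ s) := by
        simp [hc]
      rw [hw1, hrcons]
      by_cases ha : ∃ x ∈ ws, x ∈ s
      · rw [if_pos ha, if_pos (hcond.mpr ha)]
        cases hr : pvFirstIdx r w with
        | none => simp [pvOmin]
        | some j =>
          have hj : (0 : Int) ≤ j := pvFirstIdx_nonneg _ _ _ hr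
          simp only [Option.map_some, pvOmin]
          rw [min_def, if_neg (by omega)]
      · rw [if_neg ha, if_neg (fun h => ha (hcond.mp h))]
        exact pvOmin_map_add_one _ _

theorem pvAInner_eq (c : String) (s : List String) (ws : List String) :
    pvAInner c s ws = if ∃ x ∈ ws, x ∈ s then some c else none := by
  induction ws with
  | nil => simp [pvAInner]
  | cons w ws ih =>
    simp only [pvAInner, ih]
    by_cases hc : w ∈ s
    · rw [if_pos (by simpa using hc),
        if_pos (show ∃ x ∈ w :: ws, x ∈ s from ⟨w, List.mem_cons_self, hc⟩)]
    · have hcond : (∃ x ∈ w :: ws, x ∈ s) ↔ (∃ x ∈ ws, x ∈ s) := by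
        simp [hc]
      rw [if_neg (by simpa using hc)]
      by_cases ha : ∃ x ∈ ws, x ∈ s
      · rw [if_pos ha, if_pos (hcond.mpr ha)]
      · rw [if_neg ha, if_neg (fun h => ha (hcond.mp h))]

theorem pvGet?_cons_succ_of_nonneg (x : String × List String) (xs : List (String × List String))
    (j : Int) (hj : 0 ≤ j) :
    PySem.List.pyGet? (x :: xs) (j + 1) = PySem.List.pyGet? xs j := by
  obtain ⟨n, rfl⟩ := Int.eq_ofNat_of_zero_le hj
  exact PySem.List.pyGet?_cons_succ _ _ _

theorem pvMain (cats : List (String × List String)) (ws : List String) :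
    pvAOuter cats ws =
      (pvWmin (pvFirstIdx cats) ws).bind
        (fun i => (PySem.List.pyGet? cats i).map Prod.fst) := by
  induction cats with
  | nil => simp [pvAOuter, pvFirstIdx, pvWmin_none]
  | cons c r ih =>
    obtain ⟨cn, cs⟩ := c
    simp only [pvAOuter, pvAInner_eq, pvWmin_cons_cats]
    by_cases ha : ∃ x ∈ ws, x ∈ cs
    · rw [if_pos ha, if_pos ha]
      change some cn = Option.map Prod.fst (PySem.List.pyGet? ((cn, cs) :: r) 0)
      rw [PySem.List.pyGet?_zero_cons]
      rfl
    · rw [if_neg ha, if_neg ha]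
      change pvAOuter r ws = _
      rw [ih]
      cases hm : pvWmin (pvFirstIdx r) ws with
      | none => rfl
      | some j =>
        have hj : (0 : Int) ≤ j := pvWmin_prop (0 ≤ ·) _ (pvFirstIdx_nonneg _) (by omega) ws j hm
        change Option.map Prod.fst (PySem.List.pyGet? r j)
            = Option.map Prod.fst (PySem.List.pyGet? ((cn, cs) :: r) (j + 1))
        rw [pvGet?_cons_succ_of_nonneg _ _ _ hj]

theorem pvFoldB_eq (ws : List String) (hws : ∀ w ∈ ws, w ≠ "syamimi, latif") :
    ws.foldl
        (fun b w =>
          match pvIndex.get? w with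
          | none => b
          | some p =>
            match b with
            | none => some p
            | some bb => if p < bb then some p else b) none
      = pvWmin (pvFirstIdx pvCats) ws := by
  rw [PySem.List.foldl_congr_mem ws _ (fun b w => pvOmin b (pvFirstIdx pvCats w)) none
    (by
      intro b w hw
      rw [show pvIndex.get? w = pvFirstIdx pvCats w from
        (pvIndex_get? w).trans (pvFirstIdx_agree w (hws w hw))]
      exact pvStep_eq (pvFirstIdx pvCats) b w),
    pvFoldl_omin]
  rfl

theorem pvFinal (ws : List String) (hws : ∀ w ∈ ws, w ≠ "syamimi, latif") :
    (match pvAOuter pvCats ws with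
     | some c => c
     | none => "") =
    (match ws.foldl
        (fun b w =>
          match pvIndex.get? w with
          | none => b
          | some p =>
            match b with
            | none => some p
            | some bb => if p < bb then some p else b) none with
     | none => ""
     | some i =>
        match PySem.List.pyGet? pvBCats i with
        | some cs => cs.1
        | none => "") := by
  rw [pvFoldB_eq ws hws, pvMain]
  cases hm : pvWmin (pvFirstIdx pvCats) ws with
  | none => rfl
  | some i =>
    have h0 : (0 : Int) ≤ i := pvWmin_prop (0 ≤ ·) _ (pvFirstIdx_nonneg _) (by omega) ws i hm
    have h4 : i < 4 := by
      refine pvWmin_prop (· < 4) _ ?_ (by omega) ws i hm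
      intro w j hj
      have := pvFirstIdx_lt pvCats w j hj
      simpa [pvCats] using this
    interval_cases i <;> rfl

-- ===== VERDICT (by name: the statement is the Claim_ definition above) =====
theorem categorize_ethnic_spec : Claim_equal_categorize_ethnic := by
  intro name _
  exact pvFinal (PySem.Str.split₀ (PySem.Str.lower name))
    (fun w hw => pvSplitNe (PySem.Str.lower name) w hw)
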